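-- pv_equiv track=rewrite | github.com/AdmorCum1337/Dempster-Shafer_theory | main.py | combinations_matrix_with_spaces
-- ===== SOURCE A (Python) =====
-- from itertools import combinations  # комбинаторика
--
-- def combinations_to_matrix(arr):
--     combinations_matrix = []
--     n = len(arr)
--     for r in range(1, n + 1):  # комбинации от 1 до n элементов
--         combinations_matrix.extend(list(combinations(arr, r)))
--     return combinations_matrix
--
-- def combinations_matrix_with_spaces(arr):
--     combinations_matrix = combinations_to_matrix(arr)
--     max_length = max(len(comb) for comb in combinations_matrix)
--     combinations_matrix_with_spaces = []
--     for combination in combinations_matrix: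
--         filled_combination = combination + (' ',) * (max_length - len(combination))
--         combinations_matrix_with_spaces.append(filled_combination)
--     return combinations_matrix_with_spaces
-- ===== SOURCE B (Python) =====
-- def combinations_matrix_with_spaces(arr):
--     n = len(arr)
--     result = []
--
--     def pick(r, start, chosen):
--         if r == 0:
--             result.append(tuple(chosen) + (' ',) * (n - len(chosen)))
--             return
--         for i in range(start, n - r + 1):
--             chosen.append(arr[i])
--             pick(r - 1, i + 1, chosen)
--             chosen.pop()
--
--     for r in range(1, n + 1):
--         pick(r, 0, [])
--     return result
-- ===== Notes on version B (the rewrite author's own statement) =====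
-- stated objective: alternative
-- what changed: Replaces the itertools.combinations enumeration plus a separate max()-scan-and-pad pass with a single recursive index chooser that emits each r-combination already padded to len(arr) (the padding width is known up front, so the intermediate matrix and the max() pass disappear).
-- outside the precondition, e.g. on combinations_matrix_with_spaces([]): A raises ValueError, B returns []
import Mathlib
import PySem

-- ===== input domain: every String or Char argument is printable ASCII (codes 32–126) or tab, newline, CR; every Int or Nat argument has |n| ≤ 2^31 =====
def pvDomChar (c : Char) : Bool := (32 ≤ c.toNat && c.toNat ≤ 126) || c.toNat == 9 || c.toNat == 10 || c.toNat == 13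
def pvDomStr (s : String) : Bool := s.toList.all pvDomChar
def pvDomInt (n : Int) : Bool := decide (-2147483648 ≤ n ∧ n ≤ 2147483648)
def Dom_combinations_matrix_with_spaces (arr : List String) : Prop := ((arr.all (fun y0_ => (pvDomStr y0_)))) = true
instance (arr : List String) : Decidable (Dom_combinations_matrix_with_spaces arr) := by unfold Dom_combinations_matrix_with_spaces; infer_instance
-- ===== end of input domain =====

-- B keeps the exact output but replaces itertools.combinations by an index-recursion that pads
-- each tuple to len(arr) as it is produced (objective: alternative decomposition, one pass, no max() scan).

-- ===== PORT A =====
-- itertools.combinations(xs, r), ported in itertools' emission order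
def pycomb (r : Nat) (xs : List String) : List (List String) :=
  match r, xs with
  | 0, _ => [[]]
  | _+1, [] => []
  | r+1, x :: t => (pycomb r t).map (fun c => x :: c) ++ pycomb (r+1) t

def combinations_to_matrix (arr : List String) : List (List String) :=
  -- for r in range(1, n+1): extend(combinations(arr, r))
  (List.range' 1 arr.length).foldl (fun acc r => acc ++ pycomb r arr) []

def combinations_matrix_with_spaces (arr : List String) : List (List String) :=
  -- max(len(comb) for comb in combinations_matrix): Python raises ValueError on an empty matrix (excluded by Pre_)
  match PySem.List.max? ((combinations_to_matrix arr).map (fun c => c.length)) (fun x => x) with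
  | none => []
  | some maxLength =>
      (combinations_to_matrix arr).map (fun c => c ++ List.replicate (maxLength - c.length) " ")

-- ===== PORT B =====
-- pick(r, start, chosen): choose r strictly increasing indices from [start, n-r], pad to n at the leaf
def pickB (arr : List String) (n : Nat) : Nat → Nat → List String → List (List String)
  | 0, _, chosen => [chosen ++ List.replicate (n - chosen.length) " "]
  | r+1, start, chosen =>
      (List.range' start (n - r - start)).flatMap
        (fun i => pickB arr n r (i+1) (chosen ++ [arr.getD i ""]))

def combinations_matrix_with_spaces_alt (arr : List String) : List (List String) :=
  (List.range' 1 arr.length).flatMap (fun r => pickB arr arr.length r 0 [])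

-- ===== PRECONDITION & SPEC =====
-- A's max() raises ValueError on the empty list; Pre_ excludes exactly arr = []
def Pre_combinations_matrix_with_spaces (arr : List String) : Prop := arr ≠ []
instance (arr : List String) : Decidable (Pre_combinations_matrix_with_spaces arr) := by unfold Pre_combinations_matrix_with_spaces; infer_instance
def pvWitness_combinations_matrix_with_spaces : List String := ["a", "b"]

def Spec_combinations_matrix_with_spaces (arr : List String) (out : List (List String)) : Prop := out = combinations_matrix_with_spaces_alt arr
instance (arr : List String) (out : List (List String)) : Decidable (Spec_combinations_matrix_with_spaces arr out) := by unfold Spec_combinations_matrix_with_spaces; infer_instance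

-- ===== CLAIM (what is proved, stated in full; the proofs are below) =====
def Claim_equal_combinations_matrix_with_spaces : Prop := ∀ (arr : List String), Dom_combinations_matrix_with_spaces arr → Pre_combinations_matrix_with_spaces arr → Spec_combinations_matrix_with_spaces arr (combinations_matrix_with_spaces arr)

-- ===== LEMMAS AND PROOFS =====

-- every member of pycomb r xs has length r
theorem pycomb_length {r : Nat} {xs c : List String} (h : c ∈ pycomb r xs) : c.length = r := by
  induction xs generalizing r c with
  | nil => cases r with
    | zero => simp [pycomb] at h; simp [h]
    | succ r => simp [pycomb] at h
  | cons x t ih =>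
    cases r with
    | zero => simp [pycomb] at h; simp [h]
    | succ r =>
      simp only [pycomb, List.mem_append, List.mem_map] at h
      rcases h with ⟨c', hc', rfl⟩ | h
      · simp [ih hc']
      · exact ih h

-- pycomb r xs is empty when r exceeds the length
theorem pycomb_nil_of_lt {r : Nat} {xs : List String} (h : xs.length < r) : pycomb r xs = [] := by
  induction xs generalizing r with
  | nil => cases r with
    | zero => omega
    | succ r => simp [pycomb]
  | cons x t ih =>
    cases r with
    | zero => omega
    | succ r =>
      simp only [pycomb]
      rw [ih (by simpa using h), ih (by simp at h ⊢; omega)]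
      simp

-- the full-length combination is the whole list
theorem pycomb_full (xs : List String) : pycomb xs.length xs = [xs] := by
  induction xs with
  | nil => simp [pycomb]
  | cons x t ih =>
    simp only [List.length_cons, pycomb, ih, pycomb_nil_of_lt (Nat.lt_succ_self t.length)]
    simp

-- max? with identity key picks n when n is a member bounding the list
theorem max?_id_eq_of_bound {xs : List Nat} {n : Nat} (hmem : n ∈ xs)
    (hub : ∀ y ∈ xs, y ≤ n) : PySem.List.max? xs (fun x => x) = some n := by
  have hne : xs ≠ [] := by rintro rfl; simp at hmem
  cases hm : PySem.List.max? xs (fun x => x) with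
  | none => exact absurd ((PySem.List.max?_eq_none_iff xs _).1 hm) hne
  | some m =>
    have h1 : m ≤ n := hub m (PySem.List.max?_mem hm)
    have h2 : n ≤ m := PySem.List.max?_isMax hm n hmem
    exact congrArg some (Nat.le_antisymm h1 h2)

-- pickB unfolds to pycomb on the dropped suffix (the heart of the equivalence)
theorem pickB_eq (arr : List String) (r start : Nat) (chosen : List String)
    (hs : start ≤ arr.length) :
    pickB arr arr.length r start chosen =
      (pycomb r (arr.drop start)).map
        (fun c => chosen ++ c ++ List.replicate (arr.length - (chosen.length + r)) " ") := by
  induction r generalizing start chosen with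
  | zero =>
    cases arr.drop start <;> simp [pickB, pycomb]
  | succ r ih =>
    -- inner induction on the remaining width n - start
    have main : ∀ m start chosen, start ≤ arr.length → arr.length - start ≤ m →
        pickB arr arr.length (r+1) start chosen =
          (pycomb (r+1) (arr.drop start)).map
            (fun c => chosen ++ c ++ List.replicate (arr.length - (chosen.length + (r+1))) " ") := by
      intro m
      induction m with
      | zero =>
        intro start chosen hs hm
        have h0 : start = arr.length := by omega
        subst h0
        have hlt : (arr.drop arr.length).length < r + 1 := by simp
        rw [pycomb_nil_of_lt hlt]
        simp [pickB, Nat.sub_eq_zero_of_le (by omega : arr.length - r ≤ arr.length)]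
      | succ m ihm =>
        intro start chosen hs hm
        by_cases hend : arr.length ≤ start
        · have h0 : start = arr.length := by omega
          subst h0
          have hlt : (arr.drop arr.length).length < r + 1 := by simp
          rw [pycomb_nil_of_lt hlt]
          simp [pickB, Nat.sub_eq_zero_of_le (by omega : arr.length - r ≤ arr.length)]
        · rw [Nat.not_le] at hend
          have hdrop : arr.drop start = arr[start] :: arr.drop (start+1) :=
            List.drop_eq_getElem_cons hend
          by_cases hroom : arr.length - r - start = 0
          · -- range empty: start > n - r - 1, i.e. fewer than r+1 elements remain
            have hlt : (arr.drop start).length < r + 1 := by simp; omega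
            rw [pycomb_nil_of_lt hlt]
            simp [pickB, hroom]
          · have hpos : 0 < arr.length - r - start := Nat.pos_of_ne_zero hroom
            have hrange : List.range' start (arr.length - r - start) =
                start :: List.range' (start+1) (arr.length - r - (start+1)) := by
              rcases Nat.exists_eq_succ_of_ne_zero hroom with ⟨k, hk⟩
              have hk2 : k = arr.length - r - (start+1) := by omega
              rw [hk, hk2, List.range'_succ]
            rw [pickB, hrange, List.flatMap_cons]
            have hrest : ((List.range' (start+1) (arr.length - r - (start+1))).flatMap
                (fun i => pickB arr arr.length r (i+1) (chosen ++ [arr.getD i ""])))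
                = pickB arr arr.length (r+1) (start+1) chosen := by
              simp only [pickB]
            rw [ih (start+1) (chosen ++ [arr.getD start ""]) (by omega)]
            rw [hrest, ihm (start+1) chosen (by omega) (by omega)]
            rw [hdrop]
            simp only [pycomb, List.map_append, List.map_map]
            congr 1
            apply List.map_congr_left
            intro c hc
            have hlen : chosen.length + 1 + r = chosen.length + (r + 1) := by omega
            simp [List.append_assoc, hlen, List.getElem?_eq_getElem hend]
    exact main (arr.length - start) start chosen hs le_rfl

-- combinations_to_matrix as a flatMap over r = 1..n
theorem ctm_eq (arr : List String) :
    combinations_to_matrix arr = (List.range' 1 arr.length).flatMap (fun r => pycomb r arr) := by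
  unfold combinations_to_matrix
  rw [PySem.List.foldl_append_eq_flatMap]
  simp

-- every member of the matrix has length between 1 and n … only the upper bound is needed
theorem ctm_length_le {arr c : List String} (h : c ∈ combinations_to_matrix arr) :
    c.length ≤ arr.length := by
  rw [ctm_eq] at h
  simp only [List.mem_flatMap, List.mem_range'] at h
  rcases h with ⟨r, hr, hc⟩
  rw [pycomb_length hc]
  omega

theorem ctm_mem_full {arr : List String} (h : arr ≠ []) : arr ∈ combinations_to_matrix arr := by
  rw [ctm_eq]
  refine List.mem_flatMap.2 ⟨arr.length, ?_, ?_⟩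
  · have : 0 < arr.length := List.length_pos_iff.2 h
    exact List.mem_range'.2 ⟨arr.length - 1, by omega, by omega⟩
  · rw [pycomb_full]; simp

theorem main_eq (arr : List String) (h : arr ≠ []) :
    combinations_matrix_with_spaces arr = combinations_matrix_with_spaces_alt arr := by
  have hmax : PySem.List.max? ((combinations_to_matrix arr).map (fun c => c.length)) (fun x => x)
      = some arr.length := by
    apply max?_id_eq_of_bound
    · exact List.mem_map.2 ⟨arr, ctm_mem_full h, rfl⟩
    · intro y hy
      rcases List.mem_map.1 hy with ⟨c, hc, rfl⟩
      exact ctm_length_le hc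
  unfold combinations_matrix_with_spaces
  rw [hmax]
  unfold combinations_matrix_with_spaces_alt
  dsimp only
  rw [ctm_eq, List.map_flatMap]
  apply List.flatMap_congr
  intro r hr
  rw [pickB_eq arr r 0 [] (Nat.zero_le _)]
  simp only [List.drop_zero, List.nil_append, List.length_nil, Nat.zero_add]
  apply List.map_congr_left
  intro c hc
  rw [pycomb_length hc]

-- ===== VERDICT (by name: the statement is the Claim_ definition above) =====
theorem combinations_matrix_with_spaces_spec : Claim_equal_combinations_matrix_with_spaces := by
  intro arr _ hpre
  unfold Spec_combinations_matrix_with_spaces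
  exact main_eq arr hpre
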